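-- pv_equiv track=rewrite | github.com/hasna-akbarali/invoice_classifier | app.py | best_category
-- ===== SOURCE A (Python) =====
-- from typing import Dict, Optional, List, Any, Tuple
--
-- def cat_score(cat: str) -> int:
--     c = (cat or "").strip().lower()
--     if "credit" in c:
--         return 2
--     if "invoice" in c:
--         return 1
--     return 0
--
-- def best_category(cats: List[str]) -> str:
--     # Credit Note > Tax Invoice > Others
--     best = "Others"
--     best_s = -1
--     for c in cats:
--         s = cat_score(c)
--         if s > best_s:
--             best_s = s
--             best = "Credit Note" if s == 2 else ("Tax Invoice" if s == 1 else "Others")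
--     return best
-- ===== SOURCE B (Python) =====
-- def cat_score(cat: str) -> int:
--     c = (cat or "").strip().lower()
--     if "credit" in c:
--         return 2
--     if "invoice" in c:
--         return 1
--     return 0
--
-- def best_category(cats):
--     # Credit Note > Tax Invoice > Others, resolved by priority-tier membership
--     scores = [cat_score(c) for c in cats]
--     if 2 in scores:
--         return "Credit Note"
--     if 1 in scores:
--         return "Tax Invoice"
--     return "Others"
-- ===== Notes on version B (the rewrite author's own statement) =====
-- stated objective: simpler
-- what changed: Replaces the running-max accumulator loop (best label + best score carried through one pass) with a map to scores followed by priority-ordered membership tests (2 in scores, then 1 in scores).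
import Mathlib
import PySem

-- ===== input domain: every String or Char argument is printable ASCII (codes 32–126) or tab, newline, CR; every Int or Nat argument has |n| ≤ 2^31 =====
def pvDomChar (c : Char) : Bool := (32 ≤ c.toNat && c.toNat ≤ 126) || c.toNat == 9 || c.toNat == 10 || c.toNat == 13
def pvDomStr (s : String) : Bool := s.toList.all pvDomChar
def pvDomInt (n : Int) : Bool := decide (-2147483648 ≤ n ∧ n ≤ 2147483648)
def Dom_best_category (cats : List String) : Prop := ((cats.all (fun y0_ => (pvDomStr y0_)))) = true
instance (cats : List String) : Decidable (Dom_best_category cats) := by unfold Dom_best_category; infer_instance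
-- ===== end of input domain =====

-- B replaces A's running-max accumulator loop with a score map plus priority-tier membership tests (simpler decomposition, same cost).

-- ===== PORT A =====
-- helper cat_score, shared verbatim by both Pythons ('cat or ""' is 'cat' for a str argument)
def cat_score (cat : String) : Int :=
  let c := PySem.Str.lower (PySem.Str.strip cat)
  if PySem.Str.isIn "credit" c then 2
  else if PySem.Str.isIn "invoice" c then 1
  else 0

def best_category (cats : List String) : String :=
  (cats.foldl (fun (st : String × Int) c =>
      let s := cat_score c
      if s > st.2 then
        ((if s = 2 then "Credit Note" else if s = 1 then "Tax Invoice" else "Others"), s)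
      else st)
    ("Others", -1)).1

-- ===== PORT B =====
def best_category_alt (cats : List String) : String :=
  let scores := cats.map cat_score
  if 2 ∈ scores then "Credit Note"
  else if 1 ∈ scores then "Tax Invoice"
  else "Others"

-- ===== PRECONDITION & SPEC =====
def Spec_best_category (cats : List String) (out : String) : Prop := out = best_category_alt cats
instance (cats : List String) (out : String) : Decidable (Spec_best_category cats out) := by unfold Spec_best_category; infer_instance

-- ===== CLAIM (what is proved, stated in full; the proofs are below) =====
def Claim_equal_best_category : Prop := ∀ (cats : List String), Dom_best_category cats → Spec_best_category cats (best_category cats)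

-- ===== LEMMAS AND PROOFS =====

def stepA (st : String × Int) (c : String) : String × Int :=
  let s := cat_score c
  if s > st.2 then
    ((if s = 2 then "Credit Note" else if s = 1 then "Tax Invoice" else "Others"), s)
  else st

lemma cat_score_cases (c : String) : cat_score c = 2 ∨ cat_score c = 1 ∨ cat_score c = 0 := by
  simp only [cat_score]; split_ifs <;> simp

lemma foldl_from_credit (cats : List String) :
    (cats.foldl stepA ("Credit Note", 2)).1 = "Credit Note" := by
  induction cats with
  | nil => rfl
  | cons c cs ih =>
    have h := cat_score_cases c
    simp only [List.foldl, stepA]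
    rcases h with h | h | h <;> simp [h] <;> exact ih

lemma foldl_from_tax (cats : List String) :
    (cats.foldl stepA ("Tax Invoice", 1)).1 =
      (if 2 ∈ cats.map cat_score then "Credit Note" else "Tax Invoice") := by
  induction cats with
  | nil => rfl
  | cons c cs ih =>
    have h := cat_score_cases c
    simp only [List.foldl, List.map_cons, List.mem_cons]
    rcases h with h | h | h
    · simp [stepA, h, foldl_from_credit]
    · simp [stepA, h, ih]
    · simp [stepA, h, ih]

lemma foldl_from_others (cats : List String) (b : Int) (hb : b ≤ 0) :
    (cats.foldl stepA ("Others", b)).1 =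
      (if 2 ∈ cats.map cat_score then "Credit Note"
       else if 1 ∈ cats.map cat_score then "Tax Invoice" else "Others") := by
  induction cats generalizing b with
  | nil => rfl
  | cons c cs ih =>
    have h := cat_score_cases c
    simp only [List.foldl, List.map_cons, List.mem_cons]
    rcases h with h | h | h
    · have : (2:Int) > b := by omega
      simp [stepA, h, this, foldl_from_credit]
    · have : (1:Int) > b := by omega
      simp [stepA, h, this, foldl_from_tax]
    · by_cases hgt : (0:Int) > b
      · simp [stepA, h, hgt, ih 0 le_rfl]
      · simp [stepA, h, hgt, ih b hb]

-- ===== VERDICT (by name: the statement is the Claim_ definition above) =====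
theorem best_category_spec : Claim_equal_best_category := by
  intro cats _
  show best_category cats = best_category_alt cats
  unfold best_category best_category_alt
  exact foldl_from_others cats (-1) (by omega)
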